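-- pv_equiv track=rewrite | github.com/ChangMinL2E/programmers | 프로그래머스/unrated/181864. 문자열 바꿔서 찾기/문자열 바꿔서 찾기.py | solution
-- ===== SOURCE A (Python) =====
-- def solution(myString, pat):
--     answer = 0
--     for i in range(len(myString)):
--         if myString[i] == 'A':
--             myString = myString[:i]+'B'+myString[i+1:]
--         elif myString[i] == 'B':
--             myString = myString[:i]+'A'+myString[i+1:]
--
--     if pat in myString:
--         answer = 1
--
--     return answer
-- ===== SOURCE B (Python) =====
-- def _sw(c):
--     return 'B' if c == 'A' else 'A' if c == 'B' else c
--
--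
-- def solution(myString, pat):
--     n, m = len(myString), len(pat)
--     for i in range(n - m + 1):
--         if all(_sw(myString[i + j]) == pat[j] for j in range(m)):
--             return 1
--     return 0
-- ===== Notes on version B (the rewrite author's own statement) =====
-- stated objective: faster
-- what changed: B never builds the swapped copy of myString (A rebuilds the whole string by slicing at every index, then uses 'in'); B slides a window and compares pat positionally against on-the-fly swapped characters, returning on the first match.
import Mathlib
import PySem

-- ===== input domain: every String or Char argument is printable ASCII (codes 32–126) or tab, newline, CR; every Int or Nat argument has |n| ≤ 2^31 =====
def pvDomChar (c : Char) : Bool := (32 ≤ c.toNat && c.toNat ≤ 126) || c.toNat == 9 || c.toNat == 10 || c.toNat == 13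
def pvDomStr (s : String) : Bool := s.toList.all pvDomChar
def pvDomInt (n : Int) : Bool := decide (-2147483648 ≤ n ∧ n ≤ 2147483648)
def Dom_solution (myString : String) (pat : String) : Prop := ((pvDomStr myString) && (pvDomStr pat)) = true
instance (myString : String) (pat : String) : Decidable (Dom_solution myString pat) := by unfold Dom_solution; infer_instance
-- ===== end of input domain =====

-- B fuses the A/B swap with a positional sliding-window match instead of rebuilding
-- the swapped string by slicing and then testing `pat in`; same return value, different algorithm.

-- ===== PORT A =====
-- the for-loop: at each index i, rebuild the string with s[i] swapped (A<->B) via slices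
def pvSwapLoop (s : List Char) : List Char :=
  (PySem.List.pyRange 0 (s.length : Int) 1).foldl
    (fun t i =>
      if PySem.List.pyGetD t i ' ' == 'A' then
        PySem.List.slice t none (some i) ++ ['B'] ++ PySem.List.slice t (some (i + 1)) none
      else if PySem.List.pyGetD t i ' ' == 'B' then
        PySem.List.slice t none (some i) ++ ['A'] ++ PySem.List.slice t (some (i + 1)) none
      else t)
    s

def solution (myString : String) (pat : String) : Int :=
  let answer : Int := 0
  let s := pvSwapLoop myString.toList
  if PySem.Chars.isIn pat.toList s then 1 else answer

-- ===== PORT B =====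
def pvSw (c : Char) : Char := if c == 'A' then 'B' else if c == 'B' then 'A' else c

def solution_alt (myString : String) (pat : String) : Int :=
  let s := myString.toList
  let p := pat.toList
  let n := s.length
  let m := p.length
  if (PySem.List.pyRange 0 ((n : Int) - (m : Int) + 1) 1).any (fun i =>
       (PySem.List.pyRange 0 (m : Int) 1).all (fun j =>
         pvSw (PySem.List.pyGetD s (i + j) ' ') == PySem.List.pyGetD p j ' '))
  then 1 else 0

-- ===== PRECONDITION & SPEC =====
def Spec_solution (myString : String) (pat : String) (out : Int) : Prop := out = solution_alt myString pat
instance (myString : String) (pat : String) (out : Int) : Decidable (Spec_solution myString pat out) := by unfold Spec_solution; infer_instance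

-- ===== CLAIM (what is proved, stated in full; the proofs are below) =====
def Claim_equal_solution : Prop := ∀ (myString : String) (pat : String), Dom_solution myString pat → Spec_solution myString pat (solution myString pat)

-- ===== LEMMAS AND PROOFS =====

-- the swap loop of A rewrites the string to its character-wise swapped image
theorem pvSwapLoop_aux (b a : List Char) :
    (PySem.List.pyRange (a.length : Int) ((a.length + b.length : Nat) : Int) 1).foldl
      (fun t i =>
        if PySem.List.pyGetD t i ' ' == 'A' then
          PySem.List.slice t none (some i) ++ ['B'] ++ PySem.List.slice t (some (i + 1)) none
        else if PySem.List.pyGetD t i ' ' == 'B' then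
          PySem.List.slice t none (some i) ++ ['A'] ++ PySem.List.slice t (some (i + 1)) none
        else t)
      (a ++ b) = a ++ b.map pvSw := by
  induction b generalizing a with
  | nil => simp [PySem.List.pyRange_one_eq_nil le_rfl]
  | cons c b ih =>
    rw [PySem.List.pyRange_one_cons (by push_cast [List.length_cons]; omega)]
    rw [List.foldl_cons]
    have hget : PySem.List.pyGetD (a ++ c :: b) (a.length : Int) ' ' = c := by
      simp [PySem.List.pyGetD_natCast, List.getD_eq_getElem?_getD]
    have hsl1 : PySem.List.slice (a ++ c :: b) none (some (a.length : Int)) = a := by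
      rw [PySem.List.slice_to_natCast]; simp
    have hsl2 : PySem.List.slice (a ++ c :: b) (some ((a.length : Int) + 1)) none = b := by
      have h : (a.length : Int) + 1 = ((a.length + 1 : Nat) : Int) := by push_cast; ring
      rw [h, PySem.List.slice_from_natCast]
      simp
    have key : ∀ d : Char,
        (PySem.List.pyRange ((a.length : Int) + 1) ((a.length + (c :: b).length : Nat) : Int) 1).foldl
          (fun t i =>
            if PySem.List.pyGetD t i ' ' == 'A' then
              PySem.List.slice t none (some i) ++ ['B'] ++ PySem.List.slice t (some (i + 1)) none
            else if PySem.List.pyGetD t i ' ' == 'B' then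
              PySem.List.slice t none (some i) ++ ['A'] ++ PySem.List.slice t (some (i + 1)) none
            else t)
          ((a ++ [d]) ++ b) = (a ++ [d]) ++ b.map pvSw := by
      intro d
      have h1 : (a.length : Int) + 1 = (((a ++ [d]).length : Nat) : Int) := by
        simp
      have h2 : ((a.length + (c :: b).length : Nat) : Int)
          = (((a ++ [d]).length + b.length : Nat) : Int) := by
        push_cast [List.length_append, List.length_cons, List.length_nil]; omega
      rw [h1, h2, ih (a ++ [d])]
    by_cases hA : c = 'A'
    · subst hA
      simp only [hget, hsl1, hsl2, show (('A' == 'A') = true) from rfl, if_true]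
      rw [show a ++ ['B'] ++ b = (a ++ ['B']) ++ b from by simp, key 'B']
      simp [pvSw]
    · by_cases hB : c = 'B'
      · subst hB
        simp only [hget, hsl1, hsl2, show (('B' == 'A') = false) from rfl,
          show (('B' == 'B') = true) from rfl, Bool.false_eq_true, if_false, if_true]
        rw [show a ++ ['A'] ++ b = (a ++ ['A']) ++ b from by simp, key 'A']
        simp [pvSw]
      · simp only [hget, show ((c == 'A') = false) from by simp [hA],
          show ((c == 'B') = false) from by simp [hB], Bool.false_eq_true, if_false]
        rw [show a ++ c :: b = (a ++ [c]) ++ b from by simp, key c]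
        simp [pvSw, hA, hB]

theorem pvSwapLoop_eq_map (s : List Char) : pvSwapLoop s = s.map pvSw := by
  have := pvSwapLoop_aux s []
  simpa [pvSwapLoop] using this

theorem pvGetD_map_pvSw (s : List Char) (k : ℕ) :
    (s.map pvSw).getD k ' ' = pvSw (s.getD k ' ') := by
  simp only [List.getD_eq_getElem?_getD, List.getElem?_map]
  cases s[k]? <;> rfl

theorem pvPrefix_pointwise (p t : List Char) :
    p <+: t ↔ (p.length ≤ t.length ∧ ∀ j < p.length, t.getD j ' ' = p.getD j ' ') := by
  constructor
  · rintro ⟨r, rfl⟩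
    refine ⟨by simp, fun j hj => ?_⟩
    simp [List.getD_eq_getElem?_getD, List.getElem?_append_left hj]
  · rintro ⟨hlen, hpt⟩
    rw [List.prefix_iff_eq_take]
    apply List.ext_getElem (by simp [hlen])
    intro j h1 h2
    have := hpt j h1
    simp only [List.getD_eq_getElem?_getD] at this
    rw [List.getElem?_eq_getElem h1, List.getElem?_eq_getElem (by omega : j < t.length)] at this
    simpa [List.getElem_take] using this.symm

-- bridge: existence of an occurrence ↔ a window position with pointwise match
theorem pvOccur_iff (p t : List Char) :
    (∃ k, p <+: t.drop k) ↔
    (∃ i : ℕ, i + p.length ≤ t.length ∧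
       ∀ j < p.length, t.getD (i + j) ' ' = p.getD j ' ') := by
  constructor
  · rintro ⟨k, hk⟩
    rw [pvPrefix_pointwise] at hk
    obtain ⟨hlen, hpt⟩ := hk
    simp only [List.length_drop] at hlen
    by_cases hkn : k ≤ t.length
    · refine ⟨k, by omega, fun j hj => ?_⟩
      have := hpt j hj
      rwa [show (t.drop k).getD j ' ' = t.getD (k + j) ' ' from by
        simp [List.getD_eq_getElem?_getD, List.getElem?_drop]] at this
    · exact ⟨0, by omega, fun j hj => absurd hj (by omega)⟩
  · rintro ⟨i, hle, hpt⟩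
    refine ⟨i, ?_⟩
    rw [pvPrefix_pointwise]
    refine ⟨by simp; omega, fun j hj => ?_⟩
    rw [show (t.drop i).getD j ' ' = t.getD (i + j) ' ' from by
      simp [List.getD_eq_getElem?_getD, List.getElem?_drop]]
    exact hpt j hj

-- A's final membership test agrees with B's sliding window
theorem pvCond_iff (s p : List Char) :
    PySem.Chars.isIn p (s.map pvSw) = true ↔
    ((PySem.List.pyRange 0 ((s.length : Int) - (p.length : Int) + 1) 1).any (fun i =>
       (PySem.List.pyRange 0 (p.length : Int) 1).all (fun j =>
         pvSw (PySem.List.pyGetD s (i + j) ' ') == PySem.List.pyGetD p j ' '))) = true := by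
  rw [← PySem.Chars.exists_prefix_drop_iff_isIn, pvOccur_iff]
  constructor
  · rintro ⟨i, hle, hpt⟩
    rw [List.length_map] at hle
    rw [List.any_eq_true]
    refine ⟨(i : Int), ?_, ?_⟩
    · rw [PySem.List.mem_pyRange_one]
      exact ⟨Int.natCast_nonneg i, by omega⟩
    · rw [List.all_eq_true]
      intro j hj
      rw [PySem.List.mem_pyRange_one] at hj
      obtain ⟨hj0, hjm⟩ := hj
      obtain ⟨jn, rfl⟩ := Int.eq_ofNat_of_zero_le hj0
      have hjm' : jn < p.length := by exact_mod_cast hjm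
      have h := hpt jn hjm'
      rw [pvGetD_map_pvSw] at h
      rw [show ((i : Int) + (jn : Int)) = (((i + jn : Nat)) : Int) from by push_cast; ring]
      simp only [PySem.List.pyGetD_natCast, beq_iff_eq]
      exact h
  · intro hAny
    rw [List.any_eq_true] at hAny
    obtain ⟨i, hmem, hall⟩ := hAny
    rw [PySem.List.mem_pyRange_one] at hmem
    obtain ⟨hi0, hilt⟩ := hmem
    obtain ⟨iN, rfl⟩ := Int.eq_ofNat_of_zero_le hi0
    refine ⟨iN, by simp only [List.length_map]; omega, fun j hj => ?_⟩
    rw [List.all_eq_true] at hall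
    have h := hall (j : Int) (by
      rw [PySem.List.mem_pyRange_one]
      exact ⟨Int.natCast_nonneg j, by exact_mod_cast hj⟩)
    rw [show ((iN : Int) + (j : Int)) = (((iN + j : Nat)) : Int) from by push_cast; ring] at h
    simp only [PySem.List.pyGetD_natCast, beq_iff_eq] at h
    rw [pvGetD_map_pvSw, h]

-- ===== VERDICT (by name: the statement is the Claim_ definition above) =====
theorem solution_spec : Claim_equal_solution := by
  intro myString pat _
  unfold Spec_solution solution solution_alt
  simp only [pvSwapLoop_eq_map]
  by_cases h : PySem.Chars.isIn pat.toList (myString.toList.map pvSw) = true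
  · rw [if_pos h, if_pos ((pvCond_iff myString.toList pat.toList).mp h)]
  · rw [if_neg h, if_neg (fun ha => h ((pvCond_iff myString.toList pat.toList).mpr ha))]
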